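-- pv_equiv track=rewrite | github.com/EnasBatarfi/litspace | backend/app/services/answering/answerer.py | _strip_leading_greeting
-- ===== SOURCE A (Python) =====
-- GREETING_WORDS = ("hi", "hello", "hey", "good morning", "good afternoon", "good evening")
--
-- def _strip_leading_greeting(normalized: str) -> str:
--     stripped = normalized.strip()
--     for greeting in GREETING_WORDS:
--         if stripped == greeting:
--             return ""
--         if stripped.startswith(f"{greeting} "):
--             return stripped[len(greeting):].strip()
--     return stripped
-- ===== SOURCE B (Python) =====
-- def _strip_leading_greeting(normalized: str) -> str:
--     s = normalized.strip()
--     first, _, rest = s.partition(" ")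
--     if first in ("hi", "hello", "hey"):
--         return rest.strip()
--     if first == "good":
--         second, _, rest2 = rest.partition(" ")
--         if second in ("morning", "afternoon", "evening"):
--             return rest2.strip()
--     return s
-- ===== Notes on version B (the rewrite author's own statement) =====
-- stated objective: alternative
-- what changed: Instead of scanning six greeting prefixes with equality/startswith tests, B partitions the stripped string at its first space and dispatches on the first word, with a second partition handling the two-word good-morning/afternoon/evening greetings.
import Mathlib
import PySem

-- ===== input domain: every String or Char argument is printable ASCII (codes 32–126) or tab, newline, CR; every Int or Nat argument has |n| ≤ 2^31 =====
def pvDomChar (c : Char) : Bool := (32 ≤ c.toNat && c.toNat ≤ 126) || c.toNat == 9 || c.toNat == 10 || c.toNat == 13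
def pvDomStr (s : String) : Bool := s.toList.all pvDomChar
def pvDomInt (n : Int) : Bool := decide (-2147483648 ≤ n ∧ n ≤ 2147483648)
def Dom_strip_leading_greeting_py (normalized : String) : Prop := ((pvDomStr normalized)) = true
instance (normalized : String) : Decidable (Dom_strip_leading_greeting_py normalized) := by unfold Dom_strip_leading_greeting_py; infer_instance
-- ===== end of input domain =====

-- B replaces A's scan over six greeting prefixes by partitioning off the first word and
-- dispatching on it (a second partition handles the two-word "good …" greetings); objective: alternative.

-- ===== PORT A =====
def pvGreetings : List (List Char) :=
  [['h','i'], ['h','e','l','l','o'], ['h','e','y'],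
   ['g','o','o','d',' ','m','o','r','n','i','n','g'],
   ['g','o','o','d',' ','a','f','t','e','r','n','o','o','n'],
   ['g','o','o','d',' ','e','v','e','n','i','n','g']]

-- the 'for greeting in GREETING_WORDS' loop of A, with early returns
def pvAGo : List (List Char) → List Char → List Char
  | [], st => st
  | g :: gs, st =>
    if st = g then []
    else if PySem.Chars.startswith st (g ++ [' ']) then
      PySem.Chars.strip (PySem.List.slice st (some (g.length : Int)) none)
    else pvAGo gs st

def strip_leading_greeting_py (normalized : String) : String :=
  String.mk (pvAGo pvGreetings (PySem.Chars.strip normalized.toList))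

-- ===== PORT B =====
-- s.partition(" "): hand port, exact here because the separator is the single char ' ':
-- the two pieces are the chars before the first ' ' and the chars after it ([] twice if no ' ').
def pvPartitionSpace (s : List Char) : List Char × List Char :=
  (s.takeWhile (fun c => c ≠ ' '), (s.dropWhile (fun c => c ≠ ' ')).drop 1)

def pvBCore (s : List Char) : List Char :=
  let p := pvPartitionSpace s
  if [['h','i'], ['h','e','l','l','o'], ['h','e','y']].contains p.1 then
    PySem.Chars.strip p.2
  else if p.1 = ['g','o','o','d'] then
    let q := pvPartitionSpace p.2
    if [['m','o','r','n','i','n','g'], ['a','f','t','e','r','n','o','o','n'],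
        ['e','v','e','n','i','n','g']].contains q.1 then
      PySem.Chars.strip q.2
    else s
  else s

def strip_leading_greeting_py_alt (normalized : String) : String :=
  String.mk (pvBCore (PySem.Chars.strip normalized.toList))

-- ===== PRECONDITION & SPEC =====
def Spec_strip_leading_greeting_py (normalized : String) (out : String) : Prop := out = strip_leading_greeting_py_alt normalized
instance (normalized : String) (out : String) : Decidable (Spec_strip_leading_greeting_py normalized out) := by unfold Spec_strip_leading_greeting_py; infer_instance

-- ===== CLAIM (what is proved, stated in full; the proofs are below) =====
def Claim_equal_strip_leading_greeting_py : Prop := ∀ (normalized : String), Dom_strip_leading_greeting_py normalized → Spec_strip_leading_greeting_py normalized (strip_leading_greeting_py normalized)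

-- ===== LEMMAS AND PROOFS =====

-- a string with a space is never equal to one without
theorem pv_ne_of_space {t w : List Char} (h : ' ' ∈ t) (hw : ' ' ∉ w) : t ≠ w := by
  rintro rfl; exact hw h

-- prefix through the first space: (w ++ ' ' :: u) <+: (a ++ ' ' :: b) ↔ w = a ∧ u <+: b
theorem pv_prefix_space : ∀ (w a u b : List Char), ' ' ∉ w → ' ' ∉ a →
    ((w ++ ' ' :: u) <+: (a ++ ' ' :: b) ↔ w = a ∧ u <+: b)
  | [], [], u, b, _, _ => by simp [List.cons_prefix_cons]
  | [], c :: a', u, b, hw, ha => by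
    simp only [List.nil_append, List.cons_append, List.cons_prefix_cons]
    constructor
    · rintro ⟨rfl, -⟩; exact absurd (List.mem_cons_self) ha
    · rintro ⟨h, -⟩; exact absurd h (by simp)
  | d :: w', [], u, b, hw, ha => by
    simp only [List.cons_append, List.nil_append, List.cons_prefix_cons]
    constructor
    · rintro ⟨rfl, -⟩; exact absurd (List.mem_cons_self) hw
    · rintro ⟨h, -⟩; exact absurd h (by simp)
  | d :: w', c :: a', u, b, hw, ha => by
    simp only [List.cons_append, List.cons_prefix_cons]
    rw [pv_prefix_space w' a' u b (fun h => hw (List.mem_cons_of_mem _ h))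
      (fun h => ha (List.mem_cons_of_mem _ h))]
    constructor
    · rintro ⟨rfl, rfl, h⟩; exact ⟨rfl, h⟩
    · rintro ⟨h, hu⟩; cases h; exact ⟨rfl, rfl, hu⟩

-- equality through the first space
theorem pv_eq_space (a b c d : List Char) (ha : ' ' ∉ a) (hc : ' ' ∉ c) :
    (a ++ ' ' :: b = c ++ ' ' :: d ↔ a = c ∧ b = d) := by
  constructor
  · intro h
    have h1 : (a ++ ' ' :: b) <+: (c ++ ' ' :: d) := by rw [h]
    obtain ⟨rfl, -⟩ := (pv_prefix_space a c b d ha hc).mp h1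
    exact ⟨rfl, by simpa using h⟩
  · rintro ⟨rfl, rfl⟩; rfl

-- the partition of a ++ ' ' :: b with ' ' ∉ a
theorem pv_partition_append (a b : List Char) (ha : ' ' ∉ a) :
    pvPartitionSpace (a ++ ' ' :: b) = (a, b) := by
  induction a with
  | nil => simp [pvPartitionSpace]
  | cons c a' ih =>
    have hc : c ≠ ' ' := fun h => ha (by simp [h])
    have ha' : ' ' ∉ a' := fun h => ha (List.mem_cons_of_mem _ h)
    have ih' := ih ha'
    simp [pvPartitionSpace, hc] at ih' ⊢
    exact ih' 

-- decomposing any list with a space at its first space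
theorem pv_split_at_space : ∀ (t : List Char), ' ' ∈ t →
    t = t.takeWhile (fun c => c ≠ ' ') ++ ' ' :: (t.dropWhile (fun c => c ≠ ' ')).drop 1
  | c :: t', h => by
    by_cases hc : c = ' '
    · subst hc; simp
    · have h' : ' ' ∈ t' := by
        rcases List.mem_cons.mp h with h1 | h1
        · exact absurd h1.symm hc
        · exact h1
      have ihh := pv_split_at_space t' h'
      simp [hc] at ihh ⊢
      exact ihh

theorem pv_strip_cons_space (b : List Char) : PySem.Chars.strip (' ' :: b) = PySem.Chars.strip b := by
  simp [PySem.Chars.strip, PySem.Chars.lstrip, PySem.Chars.isspace]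

theorem pv_partition_nospace (t : List Char) (h : ' ' ∉ t) : pvPartitionSpace t = (t, []) := by
  have hforall : ∀ p ∈ t, ((fun c => decide (c ≠ ' ')) p) = true := by
    intro c hc; simp; rintro rfl; exact h hc
  unfold pvPartitionSpace
  rw [List.takeWhile_eq_self_iff.mpr hforall, List.dropWhile_eq_nil_iff.mpr hforall]
  rfl

-- a pattern containing a space is no prefix of a space-free list
theorem pv_isPrefixOf_space_false (w b : List Char) (hw : ' ' ∈ w) (hb : ' ' ∉ b) :
    w.isPrefixOf b = false := by
  rw [Bool.eq_false_iff]
  intro hs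
  exact hb ((List.isPrefixOf_iff_prefix.mp hs).subset hw)

-- main case: no space in t
theorem pv_core_nospace (t : List Char) (h : ' ' ∉ t) : pvAGo pvGreetings t = pvBCore t := by
  have hpart : pvPartitionSpace t = (t, []) := pv_partition_nospace t h
  have s1 : List.isPrefixOf ['h','i',' '] t = false := pv_isPrefixOf_space_false _ t (by decide) h
  have s2 : List.isPrefixOf ['h','e','l','l','o',' '] t = false := pv_isPrefixOf_space_false _ t (by decide) h
  have s3 : List.isPrefixOf ['h','e','y',' '] t = false := pv_isPrefixOf_space_false _ t (by decide) h
  have s4 : List.isPrefixOf ['g','o','o','d',' ','m','o','r','n','i','n','g',' '] t = false := pv_isPrefixOf_space_false _ t (by decide) h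
  have s5 : List.isPrefixOf ['g','o','o','d',' ','a','f','t','e','r','n','o','o','n',' '] t = false := pv_isPrefixOf_space_false _ t (by decide) h
  have s6 : List.isPrefixOf ['g','o','o','d',' ','e','v','e','n','i','n','g',' '] t = false := pv_isPrefixOf_space_false _ t (by decide) h
  have hgm : t ≠ ['g','o','o','d',' ','m','o','r','n','i','n','g'] := fun e => h (by rw [e]; decide)
  have hga : t ≠ ['g','o','o','d',' ','a','f','t','e','r','n','o','o','n'] := fun e => h (by rw [e]; decide)
  have hge : t ≠ ['g','o','o','d',' ','e','v','e','n','i','n','g'] := fun e => h (by rw [e]; decide)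
  by_cases h1 : t = ['h','i']
  · subst h1; decide
  by_cases h2 : t = ['h','e','l','l','o']
  · subst h2; decide
  by_cases h3 : t = ['h','e','y']
  · subst h3; decide
  by_cases h4 : t = ['g','o','o','d']
  · subst h4; decide
  simp [pvAGo, pvGreetings, pvBCore, PySem.Chars.startswith, hpart,
    s1, s2, s3, s4, s5, s6, h1, h2, h3, h4, hgm, hga, hge]

-- main case: t = a ++ ' ' :: b with no space in a
theorem pv_core_space (a b : List Char) (ha : ' ' ∉ a) :
    pvAGo pvGreetings (a ++ ' ' :: b) = pvBCore (a ++ ' ' :: b) := by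
  have hpart := pv_partition_append a b ha
  have sl2 : ∀ xs : List Char, PySem.List.slice xs (some 2) none = xs.drop 2 := fun xs => PySem.List.slice_from_natCast xs 2
  have sl3 : ∀ xs : List Char, PySem.List.slice xs (some 3) none = xs.drop 3 := fun xs => PySem.List.slice_from_natCast xs 3
  have sl5 : ∀ xs : List Char, PySem.List.slice xs (some 5) none = xs.drop 5 := fun xs => PySem.List.slice_from_natCast xs 5
  have sl12 : ∀ xs : List Char, PySem.List.slice xs (some 12) none = xs.drop 12 := fun xs => PySem.List.slice_from_natCast xs 12
  have sl14 : ∀ xs : List Char, PySem.List.slice xs (some 14) none = xs.drop 14 := fun xs => PySem.List.slice_from_natCast xs 14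
  by_cases h1 : a = ['h','i']
  · subst h1
    have hp : pvPartitionSpace ('h'::'i'::' '::b) = (['h','i'], b) := hpart
    simp [pvAGo, pvGreetings, pvBCore, PySem.Chars.startswith, hp, sl2, pv_strip_cons_space]
  by_cases h2 : a = ['h','e','l','l','o']
  · subst h2
    have hp : pvPartitionSpace ('h'::'e'::'l'::'l'::'o'::' '::b) = (['h','e','l','l','o'], b) := hpart
    simp [pvAGo, pvGreetings, pvBCore, PySem.Chars.startswith, hp, sl5, pv_strip_cons_space]
  by_cases h3 : a = ['h','e','y']
  · subst h3
    have hp : pvPartitionSpace ('h'::'e'::'y'::' '::b) = (['h','e','y'], b) := hpart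
    simp [pvAGo, pvGreetings, pvBCore, PySem.Chars.startswith, hp, sl3, pv_strip_cons_space]
  by_cases h4 : a = ['g','o','o','d']
  · subst h4
    by_cases hb : ' ' ∈ b
    · -- split b at its first space as c ++ ' ' :: d
      have hbsplit := pv_split_at_space b hb
      have hc : ' ' ∉ b.takeWhile (fun c => c ≠ ' ') := by
        intro hm; have := List.mem_takeWhile_imp hm; simp at this
      revert hbsplit hc
      generalize b.takeWhile (fun c => c ≠ ' ') = c
      generalize (b.dropWhile (fun c => c ≠ ' ')).drop 1 = d
      intro hbsplit hc
      subst hbsplit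
      have hpart2 := pv_partition_append c d hc
      have hfull : pvPartitionSpace ('g'::'o'::'o'::'d'::' '::(c ++ ' ' :: d)) = (['g','o','o','d'], c ++ ' ' :: d) :=
        pv_partition_append ['g','o','o','d'] (c ++ ' ' :: d) (by decide)
      by_cases hm : c = ['m','o','r','n','i','n','g']
      · subst hm
        have hp1 : pvPartitionSpace ('g'::'o'::'o'::'d'::' '::'m'::'o'::'r'::'n'::'i'::'n'::'g'::' '::d) = (['g','o','o','d'], 'm'::'o'::'r'::'n'::'i'::'n'::'g'::' '::d) :=
          pv_partition_append ['g','o','o','d'] (['m','o','r','n','i','n','g'] ++ ' ' :: d) (by decide)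
        have hp2 : pvPartitionSpace ('m'::'o'::'r'::'n'::'i'::'n'::'g'::' '::d) = (['m','o','r','n','i','n','g'], d) :=
          pv_partition_append ['m','o','r','n','i','n','g'] d (by decide)
        simp [pvAGo, pvGreetings, pvBCore, PySem.Chars.startswith, hp1, hp2, sl12, pv_strip_cons_space]
      by_cases haft : c = ['a','f','t','e','r','n','o','o','n']
      · subst haft
        have hp1 : pvPartitionSpace ('g'::'o'::'o'::'d'::' '::'a'::'f'::'t'::'e'::'r'::'n'::'o'::'o'::'n'::' '::d) = (['g','o','o','d'], 'a'::'f'::'t'::'e'::'r'::'n'::'o'::'o'::'n'::' '::d) :=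
          pv_partition_append ['g','o','o','d'] (['a','f','t','e','r','n','o','o','n'] ++ ' ' :: d) (by decide)
        have hp2 : pvPartitionSpace ('a'::'f'::'t'::'e'::'r'::'n'::'o'::'o'::'n'::' '::d) = (['a','f','t','e','r','n','o','o','n'], d) :=
          pv_partition_append ['a','f','t','e','r','n','o','o','n'] d (by decide)
        simp [pvAGo, pvGreetings, pvBCore, PySem.Chars.startswith, hp1, hp2, sl14, pv_strip_cons_space]
      by_cases hev : c = ['e','v','e','n','i','n','g']
      · subst hev
        have hp1 : pvPartitionSpace ('g'::'o'::'o'::'d'::' '::'e'::'v'::'e'::'n'::'i'::'n'::'g'::' '::d) = (['g','o','o','d'], 'e'::'v'::'e'::'n'::'i'::'n'::'g'::' '::d) :=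
          pv_partition_append ['g','o','o','d'] (['e','v','e','n','i','n','g'] ++ ' ' :: d) (by decide)
        have hp2 : pvPartitionSpace ('e'::'v'::'e'::'n'::'i'::'n'::'g'::' '::d) = (['e','v','e','n','i','n','g'], d) :=
          pv_partition_append ['e','v','e','n','i','n','g'] d (by decide)
        simp [pvAGo, pvGreetings, pvBCore, PySem.Chars.startswith, hp1, hp2, sl12, pv_strip_cons_space]
      -- first word of b is none of the time words: both sides return the input
      have nem : c ++ ' ' :: d ≠ ['m','o','r','n','i','n','g'] := pv_ne_of_space (by simp) (by decide)
      have nea : c ++ ' ' :: d ≠ ['a','f','t','e','r','n','o','o','n'] := pv_ne_of_space (by simp) (by decide)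
      have nee : c ++ ' ' :: d ≠ ['e','v','e','n','i','n','g'] := pv_ne_of_space (by simp) (by decide)
      have swm : List.isPrefixOf ['m','o','r','n','i','n','g',' '] (c ++ ' ' :: d) = false := by
        rw [Bool.eq_false_iff]; intro hs
        exact hm (((pv_prefix_space ['m','o','r','n','i','n','g'] c [] d (by decide) hc).mp
          (List.isPrefixOf_iff_prefix.mp hs)).1.symm)
      have swa : List.isPrefixOf ['a','f','t','e','r','n','o','o','n',' '] (c ++ ' ' :: d) = false := by
        rw [Bool.eq_false_iff]; intro hs
        exact haft (((pv_prefix_space ['a','f','t','e','r','n','o','o','n'] c [] d (by decide) hc).mp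
          (List.isPrefixOf_iff_prefix.mp hs)).1.symm)
      have swe : List.isPrefixOf ['e','v','e','n','i','n','g',' '] (c ++ ' ' :: d) = false := by
        rw [Bool.eq_false_iff]; intro hs
        exact hev (((pv_prefix_space ['e','v','e','n','i','n','g'] c [] d (by decide) hc).mp
          (List.isPrefixOf_iff_prefix.mp hs)).1.symm)
      simp [pvAGo, pvGreetings, pvBCore, PySem.Chars.startswith, hfull, hpart2,
        nem, nea, nee, swm, swa, swe, hm, haft, hev]
    · -- no space in b: the second partition is (b, [])
      have hpart2 := pv_partition_nospace b hb
      have hfull : pvPartitionSpace ('g'::'o'::'o'::'d'::' '::b) = (['g','o','o','d'], b) :=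
        pv_partition_append ['g','o','o','d'] b (by decide)
      have sm : List.isPrefixOf ['m','o','r','n','i','n','g',' '] b = false := pv_isPrefixOf_space_false _ b (by decide) hb
      have sa : List.isPrefixOf ['a','f','t','e','r','n','o','o','n',' '] b = false := pv_isPrefixOf_space_false _ b (by decide) hb
      have se : List.isPrefixOf ['e','v','e','n','i','n','g',' '] b = false := pv_isPrefixOf_space_false _ b (by decide) hb
      by_cases hm : b = ['m','o','r','n','i','n','g']
      · subst hm; decide
      by_cases haft : b = ['a','f','t','e','r','n','o','o','n']
      · subst haft; decide
      by_cases hev : b = ['e','v','e','n','i','n','g']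
      · subst hev; decide
      simp [pvAGo, pvGreetings, pvBCore, PySem.Chars.startswith, hfull, hpart2,
        sm, sa, se, hm, haft, hev]
  -- a is none of hi/hello/hey/good: every branch of A and B falls through
  have hsp : ' ' ∈ a ++ ' ' :: b := by simp
  have nehi : a ++ ' ' :: b ≠ ['h','i'] := pv_ne_of_space hsp (by decide)
  have nehe : a ++ ' ' :: b ≠ ['h','e','l','l','o'] := pv_ne_of_space hsp (by decide)
  have nehy : a ++ ' ' :: b ≠ ['h','e','y'] := pv_ne_of_space hsp (by decide)
  have negm : a ++ ' ' :: b ≠ ['g','o','o','d',' ','m','o','r','n','i','n','g'] := by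
    intro e; exact h4 ((pv_eq_space a b ['g','o','o','d'] ['m','o','r','n','i','n','g'] ha (by decide)).mp e).1
  have nega : a ++ ' ' :: b ≠ ['g','o','o','d',' ','a','f','t','e','r','n','o','o','n'] := by
    intro e; exact h4 ((pv_eq_space a b ['g','o','o','d'] ['a','f','t','e','r','n','o','o','n'] ha (by decide)).mp e).1
  have nege : a ++ ' ' :: b ≠ ['g','o','o','d',' ','e','v','e','n','i','n','g'] := by
    intro e; exact h4 ((pv_eq_space a b ['g','o','o','d'] ['e','v','e','n','i','n','g'] ha (by decide)).mp e).1
  have swhi : List.isPrefixOf ['h','i',' '] (a ++ ' ' :: b) = false := by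
    rw [Bool.eq_false_iff]; intro hs
    exact h1 (((pv_prefix_space ['h','i'] a [] b (by decide) ha).mp (List.isPrefixOf_iff_prefix.mp hs)).1.symm)
  have swhe : List.isPrefixOf ['h','e','l','l','o',' '] (a ++ ' ' :: b) = false := by
    rw [Bool.eq_false_iff]; intro hs
    exact h2 (((pv_prefix_space ['h','e','l','l','o'] a [] b (by decide) ha).mp (List.isPrefixOf_iff_prefix.mp hs)).1.symm)
  have swhy : List.isPrefixOf ['h','e','y',' '] (a ++ ' ' :: b) = false := by
    rw [Bool.eq_false_iff]; intro hs
    exact h3 (((pv_prefix_space ['h','e','y'] a [] b (by decide) ha).mp (List.isPrefixOf_iff_prefix.mp hs)).1.symm)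
  have swgm : List.isPrefixOf ['g','o','o','d',' ','m','o','r','n','i','n','g',' '] (a ++ ' ' :: b) = false := by
    rw [Bool.eq_false_iff]; intro hs
    exact h4 (((pv_prefix_space ['g','o','o','d'] a ['m','o','r','n','i','n','g',' '] b (by decide) ha).mp (List.isPrefixOf_iff_prefix.mp hs)).1.symm)
  have swga : List.isPrefixOf ['g','o','o','d',' ','a','f','t','e','r','n','o','o','n',' '] (a ++ ' ' :: b) = false := by
    rw [Bool.eq_false_iff]; intro hs
    exact h4 (((pv_prefix_space ['g','o','o','d'] a ['a','f','t','e','r','n','o','o','n',' '] b (by decide) ha).mp (List.isPrefixOf_iff_prefix.mp hs)).1.symm)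
  have swge : List.isPrefixOf ['g','o','o','d',' ','e','v','e','n','i','n','g',' '] (a ++ ' ' :: b) = false := by
    rw [Bool.eq_false_iff]; intro hs
    exact h4 (((pv_prefix_space ['g','o','o','d'] a ['e','v','e','n','i','n','g',' '] b (by decide) ha).mp (List.isPrefixOf_iff_prefix.mp hs)).1.symm)
  simp [pvAGo, pvGreetings, pvBCore, PySem.Chars.startswith, hpart,
    nehi, nehe, nehy, negm, nega, nege, swhi, swhe, swhy, swgm, swga, swge, h1, h2, h3, h4]

theorem pv_core (t : List Char) : pvAGo pvGreetings t = pvBCore t := by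
  by_cases h : ' ' ∈ t
  · have ht := pv_split_at_space t h
    have ha : ' ' ∉ t.takeWhile (fun c => c ≠ ' ') := by
      intro hm
      have := List.mem_takeWhile_imp hm
      simp at this
    rw [ht]
    exact pv_core_space _ _ ha
  · exact pv_core_nospace t h

-- ===== VERDICT (by name: the statement is the Claim_ definition above) =====
theorem strip_leading_greeting_py_spec : Claim_equal_strip_leading_greeting_py := by
  intro normalized _
  unfold Spec_strip_leading_greeting_py strip_leading_greeting_py strip_leading_greeting_py_alt
  rw [pv_core]
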